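-- pv_equiv track=rewrite | github.com/RebelAKL/text-to-ISL-ASL | app.py | convert_to_isl_structure
-- ===== SOURCE A (Python) =====
-- def convert_to_isl_structure(tokens, pos_tags):
--     """Convert English structure to ISL structure (SOV)"""
--     # Basic ISL grammar conversion
--     # This is a simplified version - the actual repo has more complex rules
--
--     subjects = []
--     objects = []
--     verbs = []
--     others = []
--
--     for token, pos in pos_tags:
--         if pos.startswith('PRP'):  # Pronouns (subjects)
--             subjects.append(token.upper())
--         elif pos.startswith('NN'):  # Nouns (can be objects)
--             objects.append(token.upper())
--         elif pos.startswith('VB'):  # Verbs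
--             verbs.append(token.upper())
--         else:
--             others.append(token.upper())
--
--     # ISL follows SOV structure
--     isl_structure = subjects + objects + verbs + others
--     return isl_structure
-- ===== SOURCE B (Python) =====
-- def convert_to_isl_structure(tokens, pos_tags):
--     """Convert English structure to ISL structure (SOV)"""
--     def priority(pos):
--         if pos.startswith('PRP'):
--             return 0
--         if pos.startswith('NN'):
--             return 1
--         if pos.startswith('VB'):
--             return 2
--         return 3
--     return [token.upper() for token, pos in sorted(pos_tags, key=lambda tp: priority(tp[1]))]
-- ===== Notes on version B (the rewrite author's own statement) =====
-- stated objective: idiomatic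
-- what changed: Replaces the four explicit accumulator buckets with a single stable sort by a POS-priority key (PRP<NN<VB<other) followed by one upper-casing comprehension; stability preserves A's intra-bucket order.
import Mathlib
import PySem

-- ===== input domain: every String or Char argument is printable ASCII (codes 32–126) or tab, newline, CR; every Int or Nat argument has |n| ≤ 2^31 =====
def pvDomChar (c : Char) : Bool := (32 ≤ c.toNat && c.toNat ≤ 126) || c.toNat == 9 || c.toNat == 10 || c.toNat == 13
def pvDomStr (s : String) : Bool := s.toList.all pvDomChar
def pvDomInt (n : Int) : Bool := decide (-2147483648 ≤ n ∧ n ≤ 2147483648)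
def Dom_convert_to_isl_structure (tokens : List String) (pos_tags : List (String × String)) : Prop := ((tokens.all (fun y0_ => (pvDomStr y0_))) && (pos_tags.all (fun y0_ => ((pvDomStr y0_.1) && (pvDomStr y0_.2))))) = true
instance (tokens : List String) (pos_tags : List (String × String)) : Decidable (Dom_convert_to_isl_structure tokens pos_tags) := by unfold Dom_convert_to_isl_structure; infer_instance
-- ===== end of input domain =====

-- B replaces A's four explicit buckets with one stable sort by a POS-priority key; same result, more idiomatic.


-- ===== PORT A =====
-- the four-bucket loop, carried as a 4-tuple state exactly as A appends
def convert_to_isl_structure (tokens : List String) (pos_tags : List (String × String)) : List String :=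
  let st := pos_tags.foldl
    (fun (st : List String × List String × List String × List String) tp =>
      if PySem.Str.startswith tp.2 "PRP" then
        (st.1 ++ [PySem.Str.upper tp.1], st.2.1, st.2.2.1, st.2.2.2)
      else if PySem.Str.startswith tp.2 "NN" then
        (st.1, st.2.1 ++ [PySem.Str.upper tp.1], st.2.2.1, st.2.2.2)
      else if PySem.Str.startswith tp.2 "VB" then
        (st.1, st.2.1, st.2.2.1 ++ [PySem.Str.upper tp.1], st.2.2.2)
      else
        (st.1, st.2.1, st.2.2.1, st.2.2.2 ++ [PySem.Str.upper tp.1]))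
    ([], [], [], [])
  st.1 ++ st.2.1 ++ st.2.2.1 ++ st.2.2.2

-- ===== PORT B =====
def pvPriority (pos : String) : Nat :=
  if PySem.Str.startswith pos "PRP" then 0
  else if PySem.Str.startswith pos "NN" then 1
  else if PySem.Str.startswith pos "VB" then 2
  else 3

def convert_to_isl_structure_alt (tokens : List String) (pos_tags : List (String × String)) : List String :=
  (PySem.List.sorted pos_tags (fun tp => pvPriority tp.2) false).map (fun tp => PySem.Str.upper tp.1)

-- ===== PRECONDITION & SPEC =====
def Spec_convert_to_isl_structure (tokens : List String) (pos_tags : List (String × String)) (out : List String) : Prop := out = convert_to_isl_structure_alt tokens pos_tags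
instance (tokens : List String) (pos_tags : List (String × String)) (out : List String) : Decidable (Spec_convert_to_isl_structure tokens pos_tags out) := by unfold Spec_convert_to_isl_structure; infer_instance

-- ===== CLAIM (what is proved, stated in full; the proofs are below) =====
def Claim_equal_convert_to_isl_structure : Prop := ∀ (tokens : List String) (pos_tags : List (String × String)), Dom_convert_to_isl_structure tokens pos_tags → Spec_convert_to_isl_structure tokens pos_tags (convert_to_isl_structure tokens pos_tags)

-- ===== LEMMAS AND PROOFS =====

-- bucket i of the input, by priority of the POS tag
def pvBucket (i : Nat) (l : List (String × String)) : List (String × String) :=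
  l.filter (fun tp => pvPriority tp.2 == i)

-- inserting x into ys ++ zs when x goes after all of ys and before all of zs
theorem pvInsertBy_split {α : Type} (before : α → α → Bool) (x : α) (ys zs : List α)
    (hy : ∀ y ∈ ys, before x y = false) (hz : ∀ z ∈ zs, before x z = true) :
    PySem.List.insertBy before x (ys ++ zs) = ys ++ x :: zs := by
  induction ys with
  | nil =>
    cases zs with
    | nil => simp [PySem.List.insertBy]
    | cons z t => simp [PySem.List.insertBy, hz z (by simp)]
  | cons y t ih =>
    simp only [List.cons_append, PySem.List.insertBy, hy y (by simp)]
    simp only [Bool.false_eq_true, if_false, List.cons.injEq, true_and]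
    exact ih (fun y hy' => hy y (by simp [hy']))

theorem pvFoldl_insert_buckets (l : List (String × String))
    (B0 B1 B2 B3 : List (String × String))
    (h0 : ∀ x ∈ B0, pvPriority x.2 = 0) (h1 : ∀ x ∈ B1, pvPriority x.2 = 1)
    (h2 : ∀ x ∈ B2, pvPriority x.2 = 2) (h3 : ∀ x ∈ B3, pvPriority x.2 = 3) :
    l.foldl (fun acc x => PySem.List.insertBy
        (fun a b => decide (pvPriority a.2 < pvPriority b.2)) x acc)
      (B0 ++ B1 ++ B2 ++ B3) =
    (B0 ++ pvBucket 0 l) ++ (B1 ++ pvBucket 1 l) ++ (B2 ++ pvBucket 2 l) ++ (B3 ++ pvBucket 3 l) := by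
  induction l generalizing B0 B1 B2 B3 with
  | nil => simp [pvBucket]
  | cons x t ih =>
    have hp : pvPriority x.2 = 0 ∨ pvPriority x.2 = 1 ∨ pvPriority x.2 = 2 ∨ pvPriority x.2 = 3 := by
      unfold pvPriority; split_ifs <;> simp
    simp only [List.foldl_cons]
    rcases hp with hp | hp | hp | hp
    · have hins : PySem.List.insertBy (fun a b => decide (pvPriority a.2 < pvPriority b.2)) x
          (B0 ++ (B1 ++ B2 ++ B3)) = B0 ++ x :: (B1 ++ B2 ++ B3) := by
        apply pvInsertBy_split
        · intro y hy; simp [hp, h0 y hy]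
        · intro z hz
          simp only [List.mem_append] at hz
          rcases hz with (hz | hz) | hz
          · simp [hp, h1 z hz]
          · simp [hp, h2 z hz]
          · simp [hp, h3 z hz]
      have := ih (B0 ++ [x]) B1 B2 B3
        (by intro y hy; rcases List.mem_append.1 hy with h | h
            · exact h0 y h
            · simp at h; subst h; exact hp) h1 h2 h3
      simp only [List.append_assoc] at hins ⊢
      rw [hins]
      simpa [pvBucket, List.filter_cons, hp, List.append_assoc] using this
    · have hins : PySem.List.insertBy (fun a b => decide (pvPriority a.2 < pvPriority b.2)) x
          ((B0 ++ B1) ++ (B2 ++ B3)) = (B0 ++ B1) ++ x :: (B2 ++ B3) := by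
        apply pvInsertBy_split
        · intro y hy
          rcases List.mem_append.1 hy with h | h
          · simp [hp, h0 y h]
          · simp [hp, h1 y h]
        · intro z hz
          rcases List.mem_append.1 hz with h | h
          · simp [hp, h2 z h]
          · simp [hp, h3 z h]
      have := ih B0 (B1 ++ [x]) B2 B3 h0
        (by intro y hy; rcases List.mem_append.1 hy with h | h
            · exact h1 y h
            · simp at h; subst h; exact hp) h2 h3
      simp only [List.append_assoc] at hins ⊢
      rw [hins]
      simpa [pvBucket, List.filter_cons, hp, List.append_assoc] using this
    · have hins : PySem.List.insertBy (fun a b => decide (pvPriority a.2 < pvPriority b.2)) x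
          ((B0 ++ B1 ++ B2) ++ B3) = (B0 ++ B1 ++ B2) ++ x :: B3 := by
        apply pvInsertBy_split
        · intro y hy
          simp only [List.mem_append] at hy
          rcases hy with (h | h) | h
          · simp [hp, h0 y h]
          · simp [hp, h1 y h]
          · simp [hp, h2 y h]
        · intro z hz; simp [hp, h3 z hz]
      have := ih B0 B1 (B2 ++ [x]) B3 h0 h1
        (by intro y hy; rcases List.mem_append.1 hy with h | h
            · exact h2 y h
            · simp at h; subst h; exact hp) h3
      simp only [List.append_assoc] at hins ⊢
      rw [hins]
      simpa [pvBucket, List.filter_cons, hp, List.append_assoc] using this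
    · have hins : PySem.List.insertBy (fun a b => decide (pvPriority a.2 < pvPriority b.2)) x
          ((B0 ++ B1 ++ B2 ++ B3) ++ []) = (B0 ++ B1 ++ B2 ++ B3) ++ x :: [] := by
        apply pvInsertBy_split
        · intro y hy
          simp only [List.mem_append] at hy
          rcases hy with ((h | h) | h) | h
          · simp [hp, h0 y h]
          · simp [hp, h1 y h]
          · simp [hp, h2 y h]
          · simp [hp, h3 y h]
        · intro z hz; simp at hz
      have := ih B0 B1 B2 (B3 ++ [x]) h0 h1 h2
        (by intro y hy; rcases List.mem_append.1 hy with h | h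
            · exact h3 y h
            · simp at h; subst h; exact hp)
      simp only [List.append_assoc, List.append_nil] at hins ⊢
      rw [hins]
      simpa [pvBucket, List.filter_cons, hp, List.append_assoc] using this

-- A's loop produces exactly the upper-cased buckets
theorem pvFoldA (l : List (String × String)) (a b c d : List String) :
    l.foldl (fun (st : List String × List String × List String × List String) tp =>
      if PySem.Str.startswith tp.2 "PRP" then
        (st.1 ++ [PySem.Str.upper tp.1], st.2.1, st.2.2.1, st.2.2.2)
      else if PySem.Str.startswith tp.2 "NN" then
        (st.1, st.2.1 ++ [PySem.Str.upper tp.1], st.2.2.1, st.2.2.2)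
      else if PySem.Str.startswith tp.2 "VB" then
        (st.1, st.2.1, st.2.2.1 ++ [PySem.Str.upper tp.1], st.2.2.2)
      else
        (st.1, st.2.1, st.2.2.1, st.2.2.2 ++ [PySem.Str.upper tp.1])) (a, b, c, d) =
    (a ++ (pvBucket 0 l).map (fun tp => PySem.Str.upper tp.1),
     b ++ (pvBucket 1 l).map (fun tp => PySem.Str.upper tp.1),
     c ++ (pvBucket 2 l).map (fun tp => PySem.Str.upper tp.1),
     d ++ (pvBucket 3 l).map (fun tp => PySem.Str.upper tp.1)) := by
  induction l generalizing a b c d with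
  | nil => simp [pvBucket]
  | cons x t ih =>
    simp only [List.foldl_cons]
    by_cases hP : PySem.Str.startswith x.2 "PRP"
    · simp only [hP, if_true, ih]
      simp at hP
      simp [pvBucket, pvPriority, hP, List.append_assoc]
    · by_cases hN : PySem.Str.startswith x.2 "NN"
      · simp only [hP, hN, if_true, if_false, Bool.false_eq_true, ih]
        simp at hP hN
        simp [pvBucket, pvPriority, hP, hN, List.append_assoc]
      · by_cases hV : PySem.Str.startswith x.2 "VB"
        · simp only [hP, hN, hV, if_true, if_false, Bool.false_eq_true, ih]
          simp at hP hN hV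
          simp [pvBucket, pvPriority, hP, hN, hV, List.append_assoc]
        · simp only [hP, hN, hV, if_false, Bool.false_eq_true, ih]
          simp at hP hN hV
          simp [pvBucket, pvPriority, hP, hN, hV, List.append_assoc]

-- ===== VERDICT (by name: the statement is the Claim_ definition above) =====
theorem convert_to_isl_structure_spec : Claim_equal_convert_to_isl_structure := by
  intro tokens pos_tags _
  unfold Spec_convert_to_isl_structure convert_to_isl_structure convert_to_isl_structure_alt
  rw [PySem.List.sorted_eq_foldl_insertBy]
  have hB := pvFoldl_insert_buckets pos_tags [] [] [] []
    (by simp) (by simp) (by simp) (by simp)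
  simp only [List.append_nil, List.nil_append] at hB
  rw [pvFoldA, hB]
  simp [List.map_append]
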